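-- pv_equiv track=rewrite | github.com/Callen25/SummaryIndex | eval_supplement.py | group_by_docid
-- ===== SOURCE A (Python) =====
-- def group_by_docid(doc_ids, scores):
--     doc_id_map = dict()
--     # Assign each entry to an empty list
--     for doc_id in doc_ids:
--         doc_id_map[doc_id] = list()
--     # For each doc_id add its associated scores
--     for i in range(len(scores)):
--         doc_id_map[doc_ids[i]].append(scores[i])
--     # For each entry sort its scores in descending order
--     for doc_id in doc_id_map:
--         doc_id_map[doc_id].sort(reverse=True)
--     return doc_id_map
-- ===== SOURCE B (Python) =====
-- def group_by_docid(doc_ids, scores):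
--     # pair each doc_id with its score once, then build the result declaratively:
--     # for each distinct doc_id (first-occurrence order), its scores are the
--     # matching pairs' scores, sorted descending.
--     pairs = list(zip(doc_ids, scores))
--     return {d: sorted((s for dd, s in pairs if dd == d), reverse=True)
--             for d in dict.fromkeys(doc_ids)}
-- ===== Notes on version B (the rewrite author's own statement) =====
-- stated objective: alternative
-- what changed: Replaces A's three mutation loops (create empty buckets, append each score by index, sort every bucket in place) by a declarative comprehension: zip doc_ids with scores once, then map each distinct doc_id (dict.fromkeys order) to the sorted-descending scores of its matching pairs; no dict mutation or bucket appends remain, trading speed (one filter pass per distinct key) for a loop-free formulation.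
import Mathlib
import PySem

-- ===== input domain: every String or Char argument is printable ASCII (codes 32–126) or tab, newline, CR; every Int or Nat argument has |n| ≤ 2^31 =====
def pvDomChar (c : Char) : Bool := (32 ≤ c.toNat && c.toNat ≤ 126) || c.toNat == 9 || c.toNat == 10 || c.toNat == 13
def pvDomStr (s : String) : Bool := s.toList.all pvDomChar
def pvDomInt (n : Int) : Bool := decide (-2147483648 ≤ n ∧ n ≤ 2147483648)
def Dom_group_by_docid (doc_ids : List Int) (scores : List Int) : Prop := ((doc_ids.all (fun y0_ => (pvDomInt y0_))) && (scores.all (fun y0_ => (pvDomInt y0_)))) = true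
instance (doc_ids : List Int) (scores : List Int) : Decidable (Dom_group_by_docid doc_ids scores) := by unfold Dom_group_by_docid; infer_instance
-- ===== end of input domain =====

-- B replaces A's three mutation loops (empty buckets, per-index append, per-key in-place
-- sort) by one zip of the inputs and a comprehension over the deduplicated keys
-- (alternative decomposition, same result).

-- ===== PORT A =====
def group_by_docid (doc_ids : List Int) (scores : List Int) : List (Int × List Int) :=
  -- doc_id_map = dict(); for doc_id in doc_ids: doc_id_map[doc_id] = list()
  let d0 : PySem.Dict Int (List Int) :=
    doc_ids.foldl (fun d k => d.insert k []) PySem.Dict.empty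
  -- for i in range(len(scores)): doc_id_map[doc_ids[i]].append(scores[i])
  let d1 :=
    (PySem.List.pyRange 0 (scores.length : Int) 1).foldl
      (fun d i => d.modify (PySem.List.pyGetD doc_ids i 0) []
        (fun l => l ++ [PySem.List.pyGetD scores i 0])) d0
  -- for doc_id in doc_id_map: doc_id_map[doc_id].sort(reverse=True)
  let d2 :=
    d1.keys.foldl (fun d k => d.modify k []
      (fun l => PySem.List.sorted l (fun x => x) true)) d1
  d2.items

-- ===== PORT B =====
def group_by_docid_alt (doc_ids : List Int) (scores : List Int) : List (Int × List Int) :=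
  -- pairs = list(zip(doc_ids, scores))
  let pairs := doc_ids.zip scores
  -- {d: sorted((s for dd, s in pairs if dd == d), reverse=True) for d in dict.fromkeys(doc_ids)}
  (PySem.List.dedup doc_ids).map (fun d =>
    (d, PySem.List.sorted ((pairs.filter (fun p => p.1 == d)).map (fun p => p.2))
          (fun x => x) true))

-- ===== PRECONDITION & SPEC =====
-- A raises IndexError (doc_ids[i]) when scores is longer than doc_ids; excluded.
def Pre_group_by_docid (doc_ids : List Int) (scores : List Int) : Prop :=
  scores.length ≤ doc_ids.length
instance (doc_ids : List Int) (scores : List Int) : Decidable (Pre_group_by_docid doc_ids scores) := by unfold Pre_group_by_docid; infer_instance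
def pvWitness_group_by_docid : List Int × List Int := ([1, 2, 1], [5, 7])

def Spec_group_by_docid (doc_ids : List Int) (scores : List Int) (out : List (Int × List Int)) : Prop := out = group_by_docid_alt doc_ids scores
instance (doc_ids : List Int) (scores : List Int) (out : List (Int × List Int)) : Decidable (Spec_group_by_docid doc_ids scores out) := by unfold Spec_group_by_docid; infer_instance

-- ===== CLAIM (what is proved, stated in full; the proofs are below) =====
def Claim_equal_group_by_docid : Prop := ∀ (doc_ids : List Int) (scores : List Int), Dom_group_by_docid doc_ids scores → Pre_group_by_docid doc_ids scores → Spec_group_by_docid doc_ids scores (group_by_docid doc_ids scores)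

-- ===== LEMMAS AND PROOFS =====

-- Set.update adds nothing when every element is already present
theorem pv_set_update_of_subset (l : List Int) (s : PySem.Set Int) (h : ∀ x ∈ l, x ∈ s) :
    PySem.Set.update s l = s := by
  induction l generalizing s with
  | nil => rfl
  | cons x xs ih =>
    have hx : PySem.Set.add s x = s := by
      simp [PySem.Set.add, PySem.Set.contains, h x (by simp)]
    show PySem.Set.update (PySem.Set.add s x) xs = s
    rw [hx]; exact ih s (fun y hy => h y (by simp [hy]))

-- after A's first loop every value read back with default [] is []
theorem pv_getD_foldl_insert_nil (l : List Int) (d : PySem.Dict Int (List Int)) (c : Int)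
    (h : d.getD c [] = []) :
    (l.foldl (fun d k => d.insert k []) d).getD c [] = [] := by
  induction l generalizing d with
  | nil => exact h
  | cons k ks ih =>
    refine ih _ ?_
    rw [PySem.Dict.getD_insert]
    split <;> simp [h]

-- A's third loop sorts exactly the entries whose key occurs in L (L nodup)
theorem pv_getD_foldl_sort (L : List Int) (d : PySem.Dict Int (List Int)) (c : Int)
    (hnd : L.Nodup) :
    (L.foldl (fun d k => d.modify k [] (fun l => PySem.List.sorted l (fun x => x) true)) d).getD c []
      = if c ∈ L then PySem.List.sorted (d.getD c []) (fun x => x) true else d.getD c [] := by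
  induction L generalizing d with
  | nil => simp
  | cons k ks ih =>
    simp only [List.foldl_cons]
    rw [ih _ (List.Nodup.of_cons hnd)]
    by_cases hck : c = k
    · subst hck
      have : c ∉ ks := (List.nodup_cons.mp hnd).1
      simp [this]
    · rw [PySem.Dict.getD_modify]
      simp [hck, List.mem_cons]

-- A's append loop over an index list, characterised per key
theorem pv_getD_append_loop (doc_ids scores : List Int) (I : List Int)
    (d : PySem.Dict Int (List Int)) (c : Int) :
    (I.foldl (fun d i => d.modify (PySem.List.pyGetD doc_ids i 0) []
        (fun l => l ++ [PySem.List.pyGetD scores i 0])) d).getD c []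
      = d.getD c [] ++
        (I.filter (fun i => PySem.List.pyGetD doc_ids i 0 == c)).map
          (fun i => PySem.List.pyGetD scores i 0) := by
  have e : I.foldl (fun d i => d.modify (PySem.List.pyGetD doc_ids i 0) []
      (fun l => l ++ [PySem.List.pyGetD scores i 0])) d
      = ((I.map (fun i => (PySem.List.pyGetD doc_ids i 0, PySem.List.pyGetD scores i 0))).foldl
          (fun d p => d.modify p.1 [] (fun l => l ++ [p.2])) d) := by
    rw [List.foldl_map]
  rw [e, PySem.Dict.getD_foldl_modify_append, List.filter_map, List.map_map]
  rfl

-- every index the score loop touches names a key created by the first loop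
theorem pv_index_key_mem (doc_ids scores : List Int)
    (hpre : scores.length ≤ doc_ids.length) (i : Int)
    (hi : i ∈ PySem.List.pyRange 0 (scores.length : Int) 1) :
    PySem.List.pyGetD doc_ids i 0 ∈ doc_ids := by
  have h := PySem.List.mem_pyRange_one.mp hi
  have h0 : (0:Int) ≤ i := h.1
  have hlt : i.toNat < doc_ids.length := by omega
  rw [PySem.List.pyGetD_of_nonneg _ _ h0, List.getD_eq_getElem _ _ hlt]
  exact List.getElem_mem hlt

-- A's bucket (scores picked by index) = B's bucket (scores filtered from the zip),
-- stated on Nat ranges first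
theorem pv_bucket_eq_nat (a b : List Int) (h : b.length ≤ a.length) (k : Int) :
    ((List.range b.length).filter (fun j => a.getD j 0 == k)).map (fun j => b.getD j 0)
      = ((a.zip b).filter (fun p => p.1 == k)).map (fun p => p.2) := by
  induction b generalizing a with
  | nil => simp
  | cons y b' ih =>
    cases a with
    | nil => simp at h
    | cons x a' =>
      rw [List.length_cons, List.range_succ_eq_map]
      simp only [List.filter_cons, List.filter_map, List.zip_cons_cons]
      have tail : ((List.range b'.length).filter
            ((fun j => (x :: a').getD j 0 == k) ∘ Nat.succ)).map
            ((fun j => (y :: b').getD j 0) ∘ Nat.succ)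
          = ((a'.zip b').filter (fun p => p.1 == k)).map (fun p => p.2) := by
        have e1 : ((fun j => (x :: a').getD j 0 == k) ∘ Nat.succ) = (fun j => a'.getD j 0 == k) := by
          funext j; simp
        have e2 : ((fun j => (y :: b').getD j 0) ∘ Nat.succ) = (fun j => b'.getD j 0) := by
          funext j; simp
        rw [e1, e2]
        exact ih a' (by simpa using h)
      have goalg : List.map (fun j => (y :: b').getD j 0)
            (List.map Nat.succ ((List.range b'.length).filter
              ((fun j => (x :: a').getD j 0 == k) ∘ Nat.succ)))
          = ((a'.zip b').filter (fun p => p.1 == k)).map (fun p => p.2) := by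
        rw [List.map_map]; exact tail
      by_cases hx : (x == k) = true
      · simp only [List.getD_cons_zero, hx, if_true, List.map_cons]
        rw [goalg]
      · simp only [List.getD_cons_zero]
        rw [if_neg hx, if_neg hx]
        exact goalg

-- the same fact in the pyRange / pyGetD form the ports use
theorem pv_bucket_eq (a b : List Int) (h : b.length ≤ a.length) (k : Int) :
    ((PySem.List.pyRange 0 (b.length : Int) 1).filter
        (fun i => PySem.List.pyGetD a i 0 == k)).map (fun i => PySem.List.pyGetD b i 0)
      = ((a.zip b).filter (fun p => p.1 == k)).map (fun p => p.2) := by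
  rw [PySem.List.pyRange_one]
  have hn : ((b.length : Int) - 0).toNat = b.length := by omega
  rw [hn]
  simp only [List.filter_map, List.map_map]
  have e1 : ((fun i => PySem.List.pyGetD a i 0 == k) ∘ fun j : Nat => (0 : Int) + j)
      = (fun j : Nat => a.getD j 0 == k) := by
    funext j; simp [PySem.List.pyGetD_natCast]
  have e2 : ((fun i => PySem.List.pyGetD b i 0) ∘ fun j : Nat => (0 : Int) + j)
      = (fun j : Nat => b.getD j 0) := by
    funext j; simp [PySem.List.pyGetD_natCast]
  rw [e1, e2]
  exact pv_bucket_eq_nat a b h k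

theorem group_by_docid_spec : Claim_equal_group_by_docid := by
  intro doc_ids scores _ hpre
  unfold Pre_group_by_docid at hpre
  unfold Spec_group_by_docid group_by_docid group_by_docid_alt
  simp only
  set K : Int → Int := fun i => PySem.List.pyGetD doc_ids i 0 with hK
  set S : Int → Int := fun i => PySem.List.pyGetD scores i 0 with hS
  set I : List Int := PySem.List.pyRange 0 (scores.length : Int) 1 with hI
  set d0 : PySem.Dict Int (List Int) :=
    doc_ids.foldl (fun d k => d.insert k []) PySem.Dict.empty with hd0
  have hk0 : d0.keys = PySem.Set.ofList doc_ids := by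
    rw [hd0, PySem.Dict.keys_foldl_insert doc_ids (fun _ _ => []) _, PySem.Dict.keys_empty]
    rfl
  have hnd0 : d0.keys.Nodup := by
    rw [hd0]
    exact PySem.Dict.nodup_keys_foldl_insert _ _ _ (by simp)
  have hv0 : ∀ c, d0.getD c [] = [] := fun c =>
    pv_getD_foldl_insert_nil _ _ _ (by simp)
  have hmemI : ∀ i ∈ I, K i ∈ d0.keys := by
    intro i hi
    rw [hk0, PySem.Set.mem_ofList]
    exact pv_index_key_mem doc_ids scores hpre i hi
  set d1 := I.foldl (fun d i => d.modify (K i) [] (fun l => l ++ [S i])) d0 with hd1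
  have hk1 : d1.keys = d0.keys := by
    rw [hd1]
    rw [PySem.Dict.keys_foldl_modify_key I K [] (fun _ i l => l ++ [S i]) d0]
    exact pv_set_update_of_subset _ _ (by
      intro x hx
      obtain ⟨i, hi, rfl⟩ := List.mem_map.mp hx
      exact hmemI i hi)
  have hnd1 : d1.keys.Nodup := by rw [hk1]; exact hnd0
  have hv1 : ∀ c, d1.getD c [] = (I.filter (fun i => K i == c)).map S := by
    intro c
    rw [hd1, pv_getD_append_loop doc_ids scores I d0 c, hv0]
    rfl
  set d2 := d1.keys.foldl
      (fun d k => d.modify k [] (fun l => PySem.List.sorted l (fun x => x) true)) d1 with hd2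
  have hk2 : d2.keys = d0.keys := by
    rw [hd2]
    rw [PySem.Dict.keys_foldl_modify d1.keys []
      (fun _ _ l => PySem.List.sorted l (fun x => x) true) d1]
    rw [pv_set_update_of_subset _ _ (fun x hx => hx), hk1]
  have hnd2 : d2.keys.Nodup := by rw [hk2]; exact hnd0
  have hv2 : ∀ c ∈ d0.keys, d2.getD c [] = PySem.List.sorted (d1.getD c []) (fun x => x) true := by
    intro c hc
    rw [hd2, pv_getD_foldl_sort d1.keys d1 c hnd1]
    rw [hk1]
    simp [hc]
  rw [PySem.Dict.items_eq_map_keys d2 hnd2 [], hk2, hk0, ← PySem.List.dedup_eq_ofList]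
  apply List.map_congr_left
  intro k hk
  have hk' : k ∈ d0.keys := by
    rw [hk0, ← PySem.List.dedup_eq_ofList]; exact hk
  rw [hv2 k hk', hv1 k, pv_bucket_eq doc_ids scores hpre k]
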